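-- pv_equiv track=rewrite | github.com/sumin123/CodingTest | 0911/SEYEONG/LINE/1.py | solution
-- ===== SOURCE A (Python) =====
-- from collections import deque
--
-- def solution(student, k):
--     answer = 0
--
--     # 브루트 포스 문제
--
--     # 전체 학생 수
--     n_total = len(student)
--
--     # 재학생의 수
--     n = student.count(1)
--
--     # 만들 수 없는 경우
--     if n < k:
--         return 0
--
--     # k값이 등장한 index를 기록하여 앞에서부터 몇개씩잘라가기
--     k_idx = deque()
--     for idx, st in enumerate(student):
--         if st == 1:
--             k_idx.append(idx)
--
--
--
--     # 맨 앞에서부터 진행하면서 k명이 되는 구간까지를 계속 커버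
--     for idx, st in enumerate(student):
--         # 현재 맨 왼쪽에 있는 재학생의 위치
--         cur_first = k_idx[0]
--
--         # 재학생 하나가 빠지는 순간 갱신
--         if idx > k_idx[0]:
--             k_idx.popleft()
--             # 더 이상 그룹을 만들 수 없는 경우
--             if len(k_idx) < k:
--                 return answer
--             cur_first = k_idx[0]
--
--         # 현재 맨 오른쪽에 있는 재학생 위치
--         cur_last = k_idx[k-1]
--
--         if len(k_idx) > k:
--             cur_next = k_idx[k]
--         else:
--             cur_next = n_total
--
--
--
--         answer += (cur_next - cur_last)
--
--
--
--     return answer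
-- ===== SOURCE B (Python) =====
-- from collections import deque
--
-- def solution(student, k):
--     n_total = len(student)
--     ones = deque(i for i, s in enumerate(student) if s == 1)
--     if len(ones) < k:
--         return 0
--     answer = 0
--     prev = -1
--     while len(ones) >= k:
--         nxt = ones[k] if len(ones) > k else n_total
--         answer += (ones[0] - prev) * (nxt - ones[k - 1])
--         prev = ones.popleft()
--     return answer
-- ===== Notes on version B (the rewrite author's own statement) =====
-- stated objective: simpler
-- what changed: Instead of A's scan over every array index maintaining a sliding deque of one-positions, B iterates once over the groups of k consecutive ones and adds left-gap times right-gap per group.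
-- outside the precondition, e.g. on solution([], 0): A returns 0, B raises IndexError; on solution([1, 0, 1], 0): A returns -2, B raises IndexError
import Mathlib
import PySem

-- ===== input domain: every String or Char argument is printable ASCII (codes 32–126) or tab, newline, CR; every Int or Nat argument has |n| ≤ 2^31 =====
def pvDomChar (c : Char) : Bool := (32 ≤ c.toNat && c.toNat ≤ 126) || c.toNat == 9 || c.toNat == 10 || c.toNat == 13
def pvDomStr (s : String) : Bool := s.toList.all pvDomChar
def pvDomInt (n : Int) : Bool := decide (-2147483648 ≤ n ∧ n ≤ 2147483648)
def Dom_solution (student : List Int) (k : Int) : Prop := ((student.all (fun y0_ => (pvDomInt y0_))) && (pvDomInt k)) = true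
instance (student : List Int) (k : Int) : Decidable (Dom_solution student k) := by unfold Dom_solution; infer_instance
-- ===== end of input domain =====

-- B replaces A's scan over every array index (maintaining a deque of upcoming one-positions)
-- by a single pass over the groups of k consecutive ones, adding left-gap * right-gap per group;
-- objective: simpler.

-- ===== PORT A =====
-- the second 'for idx, st in enumerate(student)' loop of A; st is never used by the body.
-- On an empty deque Python would raise IndexError (k_idx[0]); that happens only for k ≤ 0,
-- which Pre_ excludes, and the port returns 0 there.
def aLoop (k nTot : Int) (pairs : List (Int × Int)) (dq : List Int) (ans : Int) : Int :=
  match pairs with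
  | [] => ans
  | (idx, _st) :: rest =>
    match dq with
    | [] => 0
    | f :: dtail =>
      if f < idx then
        if (dtail.length : Int) < k then ans
        else
          let curLast := (PySem.List.pyGet? dtail (k - 1)).getD 0
          let curNext := if k < (dtail.length : Int) then (PySem.List.pyGet? dtail k).getD 0 else nTot
          aLoop k nTot rest dtail (ans + (curNext - curLast))
      else
        let curLast := (PySem.List.pyGet? (f :: dtail) (k - 1)).getD 0
        let curNext := if k < ((f :: dtail).length : Int) then (PySem.List.pyGet? (f :: dtail) k).getD 0 else nTot
        aLoop k nTot rest (f :: dtail) (ans + (curNext - curLast))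

def solution (student : List Int) (k : Int) : Int :=
  let nTot : Int := student.length
  let n : Int := PySem.List.count student 1
  if n < k then 0
  else
    let kIdx := (PySem.List.enumerate student 0).foldl
      (fun acc p => if p.2 == 1 then acc ++ [p.1] else acc) []
    aLoop k nTot (PySem.List.enumerate student 0) kIdx 0

-- ===== PORT B =====
-- the 'while len(ones) >= k' loop of B; its body reads ones[0], ones[k-1], ones[k] and pops the front.
-- On an empty 'ones' with k ≤ 0 Python's indexing would raise; Pre_ excludes k ≤ 0 and the port returns ans.
def bLoop (k nTot : Int) (ones : List Int) (prev ans : Int) : Int :=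
  match ones with
  | [] => ans
  | o :: rest =>
    if k ≤ ((o :: rest).length : Int) then
      let nxt := if k < ((o :: rest).length : Int) then (PySem.List.pyGet? (o :: rest) k).getD 0 else nTot
      bLoop k nTot rest o (ans + (o - prev) * (nxt - (PySem.List.pyGet? (o :: rest) (k - 1)).getD 0))
    else ans

def solution_alt (student : List Int) (k : Int) : Int :=
  let nTot : Int := student.length
  let ones := ((PySem.List.enumerate student 0).filter (fun p => p.2 == 1)).map Prod.fst
  if (ones.length : Int) < k then 0
  else bLoop k nTot ones (-1) 0

-- ===== PRECONDITION & SPEC =====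
-- Pre_ excludes k ≤ 0: there A's negative deque indexing either raises IndexError or returns an
-- accidental negative-index sum (e.g. -2 on ([1,0,1], 0)), and B raises IndexError.
def Pre_solution (student : List Int) (k : Int) : Prop := 1 ≤ k
instance (student : List Int) (k : Int) : Decidable (Pre_solution student k) := by unfold Pre_solution; infer_instance
def pvWitness_solution : List Int × Int := ([0, 1, 1, 0, 1], 2)

def Spec_solution (student : List Int) (k : Int) (out : Int) : Prop := out = solution_alt student k
instance (student : List Int) (k : Int) (out : Int) : Decidable (Spec_solution student k out) := by unfold Spec_solution; infer_instance

-- ===== CLAIM (what is proved, stated in full; the proofs are below) =====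
def Claim_equal_solution : Prop := ∀ (student : List Int) (k : Int), Dom_solution student k → Pre_solution student k → Spec_solution student k (solution student k)

-- ===== LEMMAS AND PROOFS =====

-- B's loop returns the accumulator as soon as fewer than k ones remain.
lemma bLoop_short (k nTot : Int) (l : List Int) (prev ans : Int)
    (h : (l.length : Int) < k) : bLoop k nTot l prev ans = ans := by
  cases l with
  | nil => rw [bLoop]
  | cons o rest => rw [bLoop, if_neg (by exact not_le.mpr h)]

-- one unfolded step of B's loop
lemma bLoop_step (k nTot : Int) (o : Int) (rest : List Int) (prev ans : Int)
    (h : k ≤ ((o :: rest).length : Int)) :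
    bLoop k nTot (o :: rest) prev ans =
      bLoop k nTot rest o
        (ans + (o - prev) *
          ((if k < ((o :: rest).length : Int) then (PySem.List.pyGet? (o :: rest) k).getD 0 else nTot)
            - (PySem.List.pyGet? (o :: rest) (k - 1)).getD 0)) := by
  rw [bLoop, if_pos h]

-- A's index scan equals B's group loop, for any strictly increasing deque lying in the scanned window.
lemma aLoop_eq_bLoop (k nTot : Int) (hk : 1 ≤ k) :
    ∀ (m : Nat) (idx : Int) (dq : List Int) (ans : Int) (pairs : List (Int × Int)),
      pairs.map Prod.fst = PySem.List.pyRange idx (idx + m) 1 →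
      dq.Pairwise (· < ·) →
      k ≤ (dq.length : Int) →
      (∀ x ∈ dq, idx - 1 ≤ x ∧ x < idx + m) →
      aLoop k nTot pairs dq ans = bLoop k nTot dq (idx - 1) ans := by
  intro m
  induction m with
  | zero =>
    intro idx dq ans pairs hmap hpw hlen hbd
    have hp : pairs = [] := by
      have hnil : PySem.List.pyRange idx (idx + ((0 : Nat) : Int)) 1 = [] :=
        PySem.List.pyRange_one_eq_nil (by omega)
      rw [hnil] at hmap
      exact List.map_eq_nil_iff.mp hmap
    subst hp
    rw [aLoop]
    cases dq with
    | nil => exfalso; simp at hlen; omega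
    | cons f dtail =>
      have hf := hbd f (by simp)
      cases dtail with
      | cons g gtail =>
        exfalso
        have hg := hbd g (by simp)
        have hfg : f < g := (List.pairwise_cons.mp hpw).1 g (by simp)
        omega
      | nil =>
        have hk1 : k = 1 := by simp at hlen; omega
        rw [bLoop_step k nTot f [] (idx - 1) ans (by simp; omega)]
        rw [bLoop_short k nTot [] f _ (by simp; omega)]
        have : f = idx - 1 := by simp at hf; omega
        rw [this]; ring
  | succ m ih =>
    intro idx dq ans pairs hmap hpw hlen hbd
    have hcons : PySem.List.pyRange idx (idx + ((m + 1 : Nat) : Int)) 1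
        = idx :: PySem.List.pyRange (idx + 1) (idx + 1 + (m : Nat)) 1 := by
      have harg : idx + ((m + 1 : Nat) : Int) = idx + 1 + (m : Nat) := by push_cast; ring
      rw [harg, PySem.List.pyRange_one_cons (by omega)]
    cases pairs with
    | nil => rw [hcons] at hmap; simp at hmap
    | cons p rest =>
      obtain ⟨p1, p2⟩ := p
      rw [hcons] at hmap
      simp only [List.map_cons] at hmap
      have hl := List.cons_eq_cons.mp hmap
      have hp1 : p1 = idx := hl.1
      have hrest : rest.map Prod.fst = PySem.List.pyRange (idx + 1) (idx + 1 + (m : Nat)) 1 := hl.2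
      cases dq with
      | nil => exfalso; simp at hlen; omega
      | cons f dtail =>
        have hfb := hbd f (by simp)
        have htailgt : ∀ x ∈ dtail, f < x := (List.pairwise_cons.mp hpw).1
        have htailpw : dtail.Pairwise (· < ·) := (List.pairwise_cons.mp hpw).2
        rw [aLoop]
        subst hp1
        by_cases hpop : f < p1
        · have hf : f = p1 - 1 := by omega
          rw [if_pos hpop]
          by_cases hshort : (dtail.length : Int) < k
          · rw [if_pos hshort]
            have h1 : k ≤ ((f :: dtail).length : Int) := hlen
            rw [bLoop_step k nTot f dtail (p1 - 1) ans h1,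
                bLoop_short k nTot dtail f _ hshort]
            rw [hf]; ring
          · rw [not_lt] at hshort
            rw [if_neg (not_lt.mpr hshort)]
            cases dtail with
            | nil => exfalso; simp at hshort; omega
            | cons d0 drest =>
              have hbd' : ∀ x ∈ d0 :: drest, (p1 + 1) - 1 ≤ x ∧ x < p1 + 1 + (m : Nat) := by
                intro x hx
                have h1 := htailgt x hx
                have h2 := hbd x (List.mem_cons_of_mem f hx)
                push_cast at h2 ⊢
                omega
              rw [ih (p1 + 1) (d0 :: drest) _ rest hrest htailpw hshort hbd']
              have hx1 : k ≤ ((f :: d0 :: drest).length : Int) := hlen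
              rw [bLoop_step k nTot f (d0 :: drest) (p1 - 1) ans hx1]
              have hx2 : k ≤ ((d0 :: drest).length : Int) := hshort
              rw [bLoop_step k nTot d0 drest f _ hx2,
                  bLoop_step k nTot d0 drest (p1 + 1 - 1) _ hx2]
              congr 1
              rw [hf]; ring
        · rw [not_lt] at hpop
          rw [if_neg (not_lt.mpr hpop)]
          have hbd' : ∀ x ∈ f :: dtail, (p1 + 1) - 1 ≤ x ∧ x < p1 + 1 + (m : Nat) := by
            intro x hx
            have h2 := hbd x hx
            rcases List.mem_cons.mp hx with h | h
            · push_cast at h2 ⊢; omega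
            · have := htailgt x h
              push_cast at h2 ⊢; omega
          rw [ih (p1 + 1) (f :: dtail) _ rest hrest hpw hlen hbd']
          rw [bLoop_step k nTot f dtail (p1 - 1) ans hlen,
              bLoop_step k nTot f dtail (p1 + 1 - 1) _ hlen]
          congr 1
          ring

lemma solution_eq (student : List Int) (k : Int) (hk : 1 ≤ k) :
    solution student k = solution_alt student k := by
  have hfold : (PySem.List.enumerate student 0).foldl
      (fun acc p => if p.2 == 1 then acc ++ [p.1] else acc) []
      = ((PySem.List.enumerate student 0).filter (fun p => p.2 == 1)).map Prod.fst := by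
    rw [PySem.List.foldl_append_if]
    simp
  have hcount : ((((PySem.List.enumerate student 0).filter (fun p => p.2 == 1)).map Prod.fst).length : Int)
      = PySem.List.count student 1 := by
    rw [PySem.List.count_eq]
    congr 1
    calc ((( PySem.List.enumerate student 0).filter (fun p => p.2 == 1)).map Prod.fst).length
        = ((PySem.List.enumerate student 0).filter (fun p => p.2 == 1)).length := List.length_map ..
      _ = (PySem.List.enumerate student 0).countP (fun p => p.2 == 1) :=
          (List.countP_eq_length_filter ..).symm
      _ = ((PySem.List.enumerate student 0).map (fun p => p.2)).countP (fun x => x == 1) := by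
          rw [List.countP_map]; rfl
      _ = student.countP (fun x => x == 1) := by rw [PySem.List.map_snd_enumerate]
      _ = student.count 1 := rfl
  have hpw : (((PySem.List.enumerate student 0).filter (fun p => p.2 == 1)).map Prod.fst).Pairwise (· < ·) := by
    apply List.pairwise_map.mpr
    exact (PySem.List.pairwise_lt_enumerate student 0).filter _
  have hbd : ∀ x ∈ ((PySem.List.enumerate student 0).filter (fun p => p.2 == 1)).map Prod.fst,
      (0 : Int) - 1 ≤ x ∧ x < 0 + (student.length : Int) := by
    intro x hx
    obtain ⟨p, hp, rfl⟩ := List.mem_map.mp hx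
    have hmem : p ∈ PySem.List.enumerate student 0 := List.mem_of_mem_filter hp
    obtain ⟨j, hj, rfl⟩ := (PySem.List.mem_enumerate_iff student 0 p).mp hmem
    simp
    omega
  have hmap : (PySem.List.enumerate student 0).map Prod.fst
      = PySem.List.pyRange 0 (0 + (student.length : Int)) 1 := by
    have := PySem.List.map_fst_enumerate student 0
    simpa using this
  simp only [solution, solution_alt]
  rw [hfold, ← hcount]
  by_cases h : ((((PySem.List.enumerate student 0).filter (fun p => p.2 == 1)).map Prod.fst).length : Int) < k
  · rw [if_pos h, if_pos h]
  · rw [if_neg h, if_neg h]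
    have hres := aLoop_eq_bLoop k (student.length : Int) hk student.length 0
      (((PySem.List.enumerate student 0).filter (fun p => p.2 == 1)).map Prod.fst) 0
      (PySem.List.enumerate student 0) hmap hpw (by omega) hbd
    have h01 : (0 : Int) - 1 = -1 := by norm_num
    rw [h01] at hres
    exact hres

-- ===== VERDICT (by name: the statement is the Claim_ definition above) =====
theorem solution_spec : Claim_equal_solution := by
  intro student k _hdom hk
  unfold Spec_solution
  exact solution_eq student k hk
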